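-- pv_equiv track=rewrite | github.com/ROBCARED/SCRAPER | analyzer.py | calculer_score_tech
-- ===== SOURCE A (Python) =====
-- def calculer_score_tech(texte: str, keywords: list) -> int:
--     """Calculate technical skills score from text."""
--     if not isinstance(texte, str):
--         return 0
--     texte = texte.lower()
--     score = 0
--     for mot in keywords:
--         if mot in texte:
--             score += 1
--     return score
-- ===== SOURCE B (Python) =====
-- def calculer_score_tech(texte: str, keywords: list) -> int:
--     """Calculate technical skills score from text.
--
--     Alternative strategy: index the lowered text once — collect every
--     substring whose length is the length of some keyword into a set —
--     then score each keyword by a single hash lookup.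
--     """
--     if not isinstance(texte, str):
--         return 0
--     t = texte.lower()
--     n = len(t)
--     lengths = {len(m) for m in keywords}
--     subs = set()
--     for L in lengths:
--         for i in range(n - L + 1):
--             subs.add(t[i:i + L])
--     score = 0
--     for mot in keywords:
--         if mot in subs:
--             score += 1
--     return score
-- ===== Notes on version B (the rewrite author's own statement) =====
-- stated objective: faster
-- what changed: A runs one full substring search ('mot in texte') per keyword; B indexes the lowered text once into a set of all its substrings of each distinct keyword length and then scores every keyword with a single hash lookup.
import Mathlib
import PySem

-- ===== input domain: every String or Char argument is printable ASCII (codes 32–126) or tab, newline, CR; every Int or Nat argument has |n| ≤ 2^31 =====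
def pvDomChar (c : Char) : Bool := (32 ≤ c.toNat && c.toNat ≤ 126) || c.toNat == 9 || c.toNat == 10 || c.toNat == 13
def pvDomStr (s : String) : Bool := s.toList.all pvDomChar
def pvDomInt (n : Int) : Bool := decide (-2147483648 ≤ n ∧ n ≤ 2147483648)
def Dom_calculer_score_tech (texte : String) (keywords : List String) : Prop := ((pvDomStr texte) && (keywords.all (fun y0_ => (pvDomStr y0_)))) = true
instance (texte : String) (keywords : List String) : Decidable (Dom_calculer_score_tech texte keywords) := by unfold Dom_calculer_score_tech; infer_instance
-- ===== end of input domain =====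

-- B replaces A's per-keyword substring searches by indexing the lowered text once (a set of all
-- substrings of each keyword length) and scoring every keyword with a single set lookup (objective: faster).

-- ===== PORT A =====
-- texte = texte.lower(); for mot in keywords: if mot in texte: score += 1
def calculer_score_tech (texte : String) (keywords : List String) : Int :=
  let texte := PySem.Str.lower texte
  keywords.foldl (fun score mot => if PySem.Str.isIn mot texte then score + 1 else score) 0

-- ===== PORT B =====
-- Source B, with the always-nonnegative ints len(m), n, L, i carried as Nat: 'lengths = {len(m) for m in
-- keywords}' is the Set of list-lengths (exact: len(m) = m.toList.length ≥ 0); 'range(n - L + 1)' is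
-- List.range (n + 1 - L) (exact: both are empty when L > n and 0,…,n-L otherwise); the slice
-- 't[i:i+L]' with 0 ≤ i, 0 ≤ L is (t.drop i).take L (exact, both clamp at the end of t).
def calculer_score_tech_alt (texte : String) (keywords : List String) : Int :=
  let t := (PySem.Str.lower texte).toList
  let n := t.length
  let lengths : PySem.Set Nat := PySem.Set.ofList (keywords.map (fun m => m.toList.length))
  let subs : PySem.Set (List Char) :=
    lengths.foldl
      (fun s L => (List.range (n + 1 - L)).foldl (fun s i => PySem.Set.add s ((t.drop i).take L)) s)
      PySem.Set.empty
  keywords.foldl (fun score mot => if PySem.Set.contains subs mot.toList then score + 1 else score) 0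

-- ===== PRECONDITION & SPEC =====
def Spec_calculer_score_tech (texte : String) (keywords : List String) (out : Int) : Prop := out = calculer_score_tech_alt texte keywords
instance (texte : String) (keywords : List String) (out : Int) : Decidable (Spec_calculer_score_tech texte keywords out) := by unfold Spec_calculer_score_tech; infer_instance

-- ===== CLAIM (what is proved, stated in full; the proofs are below) =====
def Claim_equal_calculer_score_tech : Prop := ∀ (texte : String) (keywords : List String), Dom_calculer_score_tech texte keywords → Spec_calculer_score_tech texte keywords (calculer_score_tech texte keywords)

-- ===== LEMMAS AND PROOFS =====

-- An accumulating 'if p x: score += 1' fold counts the elements satisfying p.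
theorem pvFold_count {α : Type} (p : α → Bool) (l : List α) (a : Int) :
    l.foldl (fun score x => if p x then score + 1 else score) a = a + (l.countP p : Int) := by
  induction l generalizing a with
  | nil => simp
  | cons x xs ih =>
    simp only [List.foldl_cons, List.countP_cons, ih]
    push_cast
    split_ifs <;> ring

-- Membership in a fold that adds f x for every x of l to a PySem.Set.
theorem pvMem_foldl_add {α : Type} (f : α → List Char) (l : List α) (s : PySem.Set (List Char))
    (y : List Char) :
    y ∈ l.foldl (fun s x => PySem.Set.add s (f x)) s ↔ y ∈ s ∨ ∃ x ∈ l, f x = y := by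
  induction l generalizing s with
  | nil => simp
  | cons x xs ih =>
    simp only [List.foldl_cons, ih, PySem.Set.mem_add]
    constructor
    · rintro ((hs | hx) | ⟨z, hz, hfz⟩)
      · exact Or.inl hs
      · exact Or.inr ⟨x, by simp, hx.symm⟩
      · exact Or.inr ⟨z, by simp [hz], hfz⟩
    · rintro (hs | ⟨z, hz, hfz⟩)
      · exact Or.inl (Or.inl hs)
      · rcases List.mem_cons.mp hz with rfl | hz'
        · exact Or.inl (Or.inr hfz.symm)
        · exact Or.inr ⟨z, hz', hfz⟩

-- Membership in B's substring index: some admitted length L and start i produce y.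
theorem pvMem_subs (t : List Char) (lens : List Nat) (s : PySem.Set (List Char)) (y : List Char) :
    y ∈ lens.foldl
        (fun s L => (List.range (t.length + 1 - L)).foldl
          (fun s i => PySem.Set.add s ((t.drop i).take L)) s) s
      ↔ y ∈ s ∨ ∃ L ∈ lens, ∃ i < t.length + 1 - L, (t.drop i).take L = y := by
  induction lens generalizing s with
  | nil => simp
  | cons L ls ih =>
    simp only [List.foldl_cons, ih, pvMem_foldl_add]
    constructor
    · rintro ((hs | ⟨i, hi, hy⟩) | ⟨L', hL', i, hi, hy⟩)
      · exact Or.inl hs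
      · exact Or.inr ⟨L, by simp, i, List.mem_range.mp hi, hy⟩
      · exact Or.inr ⟨L', by simp [hL'], i, hi, hy⟩
    · rintro (hs | ⟨L', hL', i, hi, hy⟩)
      · exact Or.inl (Or.inl hs)
      · rcases List.mem_cons.mp hL' with rfl | h'
        · exact Or.inl (Or.inr ⟨i, List.mem_range.mpr hi, hy⟩)
        · exact Or.inr ⟨L', h', i, hi, hy⟩

-- For a word whose length is admitted, membership in the index is exactly being an infix of t.
theorem pvSubs_iff_infix (t : List Char) (lens : List Nat) (m : List Char)
    (hm : m.length ∈ lens) :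
    m ∈ lens.foldl
        (fun s L => (List.range (t.length + 1 - L)).foldl
          (fun s i => PySem.Set.add s ((t.drop i).take L)) s) PySem.Set.empty
      ↔ m <:+: t := by
  rw [pvMem_subs]
  constructor
  · rintro (hs | ⟨L, _, i, _, hy⟩)
    · simp [PySem.Set.empty] at hs
    · exact hy ▸ ((List.take_prefix L (t.drop i)).isInfix.trans (List.drop_suffix i t).isInfix)
  · intro hinf
    rcases hinf with ⟨pre, suf, heq⟩
    refine Or.inr ⟨m.length, hm, pre.length, ?_, ?_⟩
    · have := congrArg List.length heq
      simp at this
      omega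
    · have hdrop : t.drop pre.length = m ++ suf := by
        rw [← heq]
        simp
      rw [hdrop]
      simp

-- ===== VERDICT (by name: the statement is the Claim_ definition above) =====
theorem calculer_score_tech_spec : Claim_equal_calculer_score_tech := by
  intro texte keywords _
  unfold Spec_calculer_score_tech calculer_score_tech calculer_score_tech_alt
  simp only
  rw [pvFold_count, pvFold_count]
  norm_cast
  simp only [Nat.zero_add]
  apply List.countP_congr
  intro mot hmot
  have hlen : mot.toList.length ∈
      PySem.Set.ofList (keywords.map (fun m => m.toList.length)) := by
    rw [PySem.Set.mem_ofList]
    exact List.mem_map.mpr ⟨mot, hmot, rfl⟩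
  constructor
  · intro h
    rw [PySem.Set.contains_iff,
      pvSubs_iff_infix _ _ _ hlen]
    exact (PySem.Str.isIn_iff_infix _ _).1 h
  · intro h
    rw [PySem.Set.contains_iff, pvSubs_iff_infix _ _ _ hlen] at h
    exact (PySem.Str.isIn_iff_infix _ _).2 h
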